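-- pv_equiv track=rewrite | github.com/erikstoklasa/PythonAlgorithms | 03-assignment/date.py | validateStringHelpler
-- ===== SOURCE A (Python) =====
-- helpers = ["the", "of"]
--
-- months = [
--     "January",
--     "February",
--     "March",
--     "April",
--     "May",
--     "June",
--     "July",
--     "August",
--     "September",
--     "October",
--     "November",
--     "December",
-- ]
--
-- ordinals = [
--     ["first", 1],
--     ["second", 2],
--     ["third", 3],
--     ["fifth", 5],
--     ["eighth", 8],
--     ["ninth", 9],
--     ["twelfth", 12],
--     ["twentieth", 20],
--     ["thirtieth", 30],
-- ]
--
-- numbers = [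
--     ["one", 1],
--     ["two", 2],
--     ["three", 3],
--     ["four", 4],
--     ["five", 5],
--     ["six", 6],
--     ["seven", 7],
--     ["eight", 8],
--     ["nine", 9],
--     ["ten", 10],
--     ["eleven", 11],
--     ["twelve", 12],
--     ["thirteen", 13],
--     ["fourteen", 14],
--     ["fifteen", 15],
--     ["sixteen", 16],
--     ["seventeen", 17],
--     ["eighteen", 18],
--     ["nineteen", 19],
--     ["twenty", 20],
--     ["thirty", 30],
--     ["forty", 40],
--     ["fifty", 50],
--     ["sixty", 60],
--     ["seventy", 70],
--     ["eighty", 80],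
--     ["ninety", 90],
--     ["hundred", 100],
--     ["thousand", 1000],
-- ]
--
-- def isPartOfAllowedWords(s: str) -> bool:
--     if s in helpers:
--         return True
--     if s in months:
--         return True
--     found = False
--     for row in numbers:
--         if row[0] == s or (row[0] + "th") == s:
--             found = True
--         if found:
--             return True
--     found = False
--     for row in ordinals:
--         if row[0] == s:
--             found = True
--         if found:
--             return True
--     return False
--
-- def validateStringHelpler(inp, i):
--     outer = inp
--     if isPartOfAllowedWords(inp):
--         return True
--     while not isPartOfAllowedWords(inp):
--         inp = outer[len(outer) - i - 1 :]
--         if len(inp) == len(outer):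
--             return False
--         i += 1
--     return validateStringHelpler(outer[: len(outer) - i], 0)
-- ===== SOURCE B (Python) =====
-- helpers = ["the", "of"]
--
-- months = [
--     "January", "February", "March", "April", "May", "June",
--     "July", "August", "September", "October", "November", "December",
-- ]
--
-- ordinals = [
--     ["first", 1], ["second", 2], ["third", 3], ["fifth", 5], ["eighth", 8],
--     ["ninth", 9], ["twelfth", 12], ["twentieth", 20], ["thirtieth", 30],
-- ]
--
-- numbers = [
--     ["one", 1], ["two", 2], ["three", 3], ["four", 4], ["five", 5],
--     ["six", 6], ["seven", 7], ["eight", 8], ["nine", 9], ["ten", 10],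
--     ["eleven", 11], ["twelve", 12], ["thirteen", 13], ["fourteen", 14],
--     ["fifteen", 15], ["sixteen", 16], ["seventeen", 17], ["eighteen", 18],
--     ["nineteen", 19], ["twenty", 20], ["thirty", 30], ["forty", 40],
--     ["fifty", 50], ["sixty", 60], ["seventy", 70], ["eighty", 80],
--     ["ninety", 90], ["hundred", 100], ["thousand", 1000],
-- ]
--
-- # All accepted words, computed once: helpers, months, number words (plus their
-- # "th" forms, as the original accepts) and ordinal words.
-- ALLOWED = frozenset(
--     helpers
--     + months
--     + [row[0] for row in numbers]
--     + [row[0] + "th" for row in numbers]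
--     + [row[0] for row in ordinals]
-- )
--
-- _MAX = max(map(len, ALLOWED))
--
-- def _allowed(w):
--     # only strings no longer than the longest allowed word can be allowed
--     return len(w) <= _MAX and w in ALLOWED
--
-- def validateStringHelpler(inp, i):
--     # Iterative greedy strip: repeatedly remove the shortest allowed suffix
--     # (lengths scanned from i + 1 upward, Python slice semantics), no recursion.
--     while True:
--         if _allowed(inp):
--             return True
--         n = len(inp)
--         L = i + 1
--         while True:
--             suf = inp[n - L:]
--             if len(suf) == n:
--                 return False
--             if _allowed(suf):
--                 break
--             L += 1
--         inp = inp[:n - L]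
--         i = 0
-- ===== Notes on version B (the rewrite author's own statement) =====
-- stated objective: alternative
-- what changed: Replaces the tail-recursive greedy suffix-stripper with an iterative while-loop, and replaces the four separate word-list scans of isPartOfAllowedWords by one length-bounded membership test in a single precomputed frozenset of all accepted words.
import Mathlib
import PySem

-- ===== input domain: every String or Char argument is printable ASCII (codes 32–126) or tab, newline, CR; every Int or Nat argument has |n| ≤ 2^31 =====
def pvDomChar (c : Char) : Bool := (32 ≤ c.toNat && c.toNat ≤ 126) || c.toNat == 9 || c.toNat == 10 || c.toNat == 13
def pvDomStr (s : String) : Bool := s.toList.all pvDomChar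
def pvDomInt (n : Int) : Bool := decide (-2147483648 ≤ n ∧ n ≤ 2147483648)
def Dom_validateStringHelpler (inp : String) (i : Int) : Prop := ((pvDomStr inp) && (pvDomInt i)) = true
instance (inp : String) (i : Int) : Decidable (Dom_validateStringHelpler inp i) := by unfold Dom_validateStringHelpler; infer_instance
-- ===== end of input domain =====

-- B rewrites the recursive greedy suffix-stripping as an iterative loop with one
-- precomputed set of all accepted words (alternative decomposition, same values).
-- Both ports totalize their loops with a fuel argument that is always sufficient
-- (inner loop: ≤ 2·len + |i| + 2 steps before Python's own exit; outer: ≤ len + 1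
-- strips, each removing ≥ 1 character).

-- ===== PORT A =====
def pyHelpers : List String := ["the", "of"]

def pyMonths : List String :=
  ["January", "February", "March", "April", "May", "June",
   "July", "August", "September", "October", "November", "December"]

def pyOrdinals : List (String × Int) :=
  [("first", 1), ("second", 2), ("third", 3), ("fifth", 5), ("eighth", 8),
   ("ninth", 9), ("twelfth", 12), ("twentieth", 20), ("thirtieth", 30)]

def pyNumbers : List (String × Int) :=
  [("one", 1), ("two", 2), ("three", 3), ("four", 4), ("five", 5),
   ("six", 6), ("seven", 7), ("eight", 8), ("nine", 9), ("ten", 10),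
   ("eleven", 11), ("twelve", 12), ("thirteen", 13), ("fourteen", 14),
   ("fifteen", 15), ("sixteen", 16), ("seventeen", 17), ("eighteen", 18),
   ("nineteen", 19), ("twenty", 20), ("thirty", 30), ("forty", 40),
   ("fifty", 50), ("sixty", 60), ("seventy", 70), ("eighty", 80),
   ("ninety", 90), ("hundred", 100), ("thousand", 1000)]

-- 'for row in numbers: … if found: return True' (early return = some true, fall-through = none)
def numbersLoop (s : String) : List (String × Int) → Bool → Option Bool
  | [], _ => none
  | row :: rest, found =>
      let found := if row.1 == s || (row.1 ++ "th") == s then true else found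
      if found then some true else numbersLoop s rest found

def ordinalsLoop (s : String) : List (String × Int) → Bool → Option Bool
  | [], _ => none
  | row :: rest, found =>
      let found := if row.1 == s then true else found
      if found then some true else ordinalsLoop s rest found

def isPartOfAllowedWords (s : String) : Bool :=
  if pyHelpers.contains s then true
  else if pyMonths.contains s then true
  else
    match numbersLoop s pyNumbers false with
    | some b => b
    | none =>
      match ordinalsLoop s pyOrdinals false with
      | some b => b
      | none => false

-- the 'while not isPartOfAllowedWords(inp):' loop of A, totalized by fuel
-- (some j = exit with counter j, none = 'return False'; fuel never runs out: the
-- loop exits by itself after at most 2·len(outer) + |i| + 2 iterations)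
def aLoop (outer : String) : Nat → Int → Option Int
  | 0, _ => none
  | fuel + 1, i =>
      if PySem.Str.len (PySem.Str.slice outer (some (PySem.Str.len outer - i - 1)) none) ==
          PySem.Str.len outer then none
      else if isPartOfAllowedWords
          (PySem.Str.slice outer (some (PySem.Str.len outer - i - 1)) none) then some (i + 1)
      else aLoop outer fuel (i + 1)

-- the recursion of A, totalized by fuel (each recursive call strips ≥ 1 character)
def aGo : Nat → String → Int → Bool
  | 0, _, _ => false
  | fuel + 1, inp, i =>
      if isPartOfAllowedWords inp then true
      else
        match aLoop inp (2 * inp.toList.length + i.natAbs + 2) i with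
        | none => false
        | some j => aGo fuel (PySem.Str.slice inp none (some (PySem.Str.len inp - j))) 0

def validateStringHelpler (inp : String) (i : Int) : Bool :=
  aGo (inp.toList.length + 1) inp i

-- ===== PORT B =====
-- ALLOWED: all accepted words in one set, computed once
def allowedWords : PySem.Set String :=
  PySem.Set.ofList
    (pyHelpers ++ pyMonths ++ pyNumbers.map (·.1) ++ pyNumbers.map (fun r => r.1 ++ "th") ++
      pyOrdinals.map (·.1))

-- longest allowed word (Python: max(map(len, ALLOWED)); the set is nonempty, so the
-- .getD default is never used)
def maxAllowed : Int :=
  (PySem.List.max? (List.map PySem.Str.len allowedWords) (fun x => x)).getD 0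

-- '_allowed(w)': cheap length bound, then one set-membership test
def allowedB (w : String) : Bool :=
  decide (PySem.Str.len w ≤ maxAllowed) && PySem.Set.contains allowedWords w

-- inner scan of B, totalized by the same always-sufficient fuel: first length
-- L ≥ i+1 whose slice inp[n-L:] is an allowed word (none = 'return False')
def bScan (inp : String) : Nat → Int → Option Int
  | 0, _ => none
  | fuel + 1, L =>
      if PySem.Str.len (PySem.Str.slice inp (some (PySem.Str.len inp - L)) none) ==
          PySem.Str.len inp then none
      else if allowedB (PySem.Str.slice inp (some (PySem.Str.len inp - L)) none) then some L
      else bScan inp fuel (L + 1)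

-- 'while True:' of B, totalized by fuel — strip the found suffix, reset i to 0, repeat
def bGo : Nat → String → Int → Bool
  | 0, _, _ => false
  | fuel + 1, inp, i =>
      if allowedB inp then true
      else
        match bScan inp (2 * inp.toList.length + i.natAbs + 2) (i + 1) with
        | none => false
        | some L => bGo fuel (PySem.Str.slice inp none (some (PySem.Str.len inp - L))) 0

def validateStringHelpler_alt (inp : String) (i : Int) : Bool :=
  bGo (inp.toList.length + 1) inp i

-- ===== PRECONDITION & SPEC =====
def Spec_validateStringHelpler (inp : String) (i : Int) (out : Bool) : Prop := out = validateStringHelpler_alt inp i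
instance (inp : String) (i : Int) (out : Bool) : Decidable (Spec_validateStringHelpler inp i out) := by unfold Spec_validateStringHelpler; infer_instance

-- ===== CLAIM (what is proved, stated in full; the proofs are below) =====
def Claim_equal_validateStringHelpler : Prop := ∀ (inp : String) (i : Int), Dom_validateStringHelpler inp i → Spec_validateStringHelpler inp i (validateStringHelpler inp i)

-- ===== LEMMAS AND PROOFS =====
theorem numbersLoop_eq (s : String) (rows : List (String × Int)) :
    numbersLoop s rows false =
      if rows.any (fun r => r.1 == s || (r.1 ++ "th") == s) then some true else none := by
  induction rows with
  | nil => simp [numbersLoop]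
  | cons r rest ih =>
      by_cases h : (r.1 == s || (r.1 ++ "th") == s) = true
      · simp [numbersLoop, List.any_cons, h]
      · rw [Bool.not_eq_true, Bool.or_eq_false_iff] at h
        simp only [numbersLoop, List.any_cons, h.1, h.2, Bool.false_or, Bool.or_false,
          if_false, Bool.false_eq_true]
        exact ih

theorem ordinalsLoop_eq (s : String) (rows : List (String × Int)) :
    ordinalsLoop s rows false =
      if rows.any (fun r => r.1 == s) then some true else none := by
  induction rows with
  | nil => simp [ordinalsLoop]
  | cons r rest ih =>
      by_cases h : (r.1 == s) = true
      · simp [ordinalsLoop, List.any_cons, h]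
      · rw [Bool.not_eq_true] at h
        simp only [ordinalsLoop, List.any_cons, h, Bool.false_or, Bool.false_eq_true, if_false]
        exact ih

theorem isPart_eq_bool (s : String) :
    isPartOfAllowedWords s =
      (pyHelpers.contains s || pyMonths.contains s ||
       pyNumbers.any (fun r => r.1 == s || (r.1 ++ "th") == s) ||
       pyOrdinals.any (fun r => r.1 == s)) := by
  unfold isPartOfAllowedWords
  rw [numbersLoop_eq, ordinalsLoop_eq]
  cases hA : pyNumbers.any (fun r => r.1 == s || (r.1 ++ "th") == s) <;>
    cases hB : pyOrdinals.any (fun r => r.1 == s) <;>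
      simp

theorem numbers_any_iff (s : String) :
    (pyNumbers.any (fun r => r.1 == s || (r.1 ++ "th") == s) = true) ↔
      (s ∈ pyNumbers.map (·.1) ∨ s ∈ pyNumbers.map (fun r => r.1 ++ "th")) := by
  simp only [List.any_eq_true, Bool.or_eq_true, beq_iff_eq, List.mem_map]
  constructor
  · rintro ⟨r, hr, h | h⟩
    · exact Or.inl ⟨r, hr, h⟩
    · exact Or.inr ⟨r, hr, h⟩
  · rintro (⟨r, hr, h⟩ | ⟨r, hr, h⟩)
    · exact ⟨r, hr, Or.inl h⟩
    · exact ⟨r, hr, Or.inr h⟩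

theorem ordinals_any_iff (s : String) :
    (pyOrdinals.any (fun r => r.1 == s) = true) ↔ s ∈ pyOrdinals.map (·.1) := by
  simp only [List.any_eq_true, beq_iff_eq, List.mem_map]

set_option maxRecDepth 16384 in
theorem allowed_eq (s : String) :
    isPartOfAllowedWords s = PySem.Set.contains allowedWords s := by
  rw [Bool.eq_iff_iff, isPart_eq_bool]
  have hR : PySem.Set.contains allowedWords s = true ↔
      s ∈ (pyHelpers ++ pyMonths ++ pyNumbers.map (·.1) ++
        pyNumbers.map (fun r => r.1 ++ "th") ++ pyOrdinals.map (·.1)) := by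
    unfold allowedWords
    rw [PySem.Set.contains_iff]
    exact PySem.Set.mem_ofList _ _
  rw [hR]
  simp only [List.mem_append, Bool.or_eq_true]
  rw [numbers_any_iff s, ordinals_any_iff s, List.contains_iff_mem, List.contains_iff_mem]
  tauto

set_option maxRecDepth 16384 in
theorem allowedB_eq (s : String) : allowedB s = PySem.Set.contains allowedWords s := by
  cases hc : PySem.Set.contains allowedWords s with
  | false => simp only [allowedB, hc, Bool.and_false]
  | true =>
      have hmem : s ∈ allowedWords := (PySem.Set.contains_iff _ _).mp hc
      have hall : allowedWords.all (fun w => decide (PySem.Str.len w ≤ maxAllowed)) = true := by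
        decide
      have hlen := List.all_eq_true.mp hall s hmem
      simp only [allowedB, hc, Bool.and_true]
      simpa using hlen

theorem allowedB_eq_isPart (s : String) : isPartOfAllowedWords s = allowedB s := by
  rw [allowed_eq, allowedB_eq]

theorem aLoop_eq_bScan (outer : String) (fuel : Nat) :
    ∀ i : Int, aLoop outer fuel i = bScan outer fuel (i + 1) := by
  induction fuel with
  | zero => intro i; rfl
  | succ f ih =>
      intro i
      rw [aLoop, bScan]
      rw [show PySem.Str.len outer - (i + 1) = PySem.Str.len outer - i - 1 by ring]
      rw [allowedB_eq_isPart]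
      by_cases h1 : (PySem.Str.len (PySem.Str.slice outer (some (PySem.Str.len outer - i - 1)) none)
          == PySem.Str.len outer) = true
      · rw [if_pos h1, if_pos h1]
      · rw [if_neg h1, if_neg h1]
        by_cases h2 : allowedB
            (PySem.Str.slice outer (some (PySem.Str.len outer - i - 1)) none) = true
        · rw [if_pos h2, if_pos h2]
        · rw [if_neg h2, if_neg h2, ih (i + 1), show i + 1 + 1 = i + 2 by ring]

theorem aGo_eq_bGo (fuel : Nat) : ∀ (inp : String) (i : Int), aGo fuel inp i = bGo fuel inp i := by
  induction fuel with
  | zero => intro inp i; rfl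
  | succ f ih =>
      intro inp i
      rw [aGo, bGo, allowedB_eq_isPart]
      by_cases h : allowedB inp = true
      · rw [if_pos h, if_pos h]
      · rw [if_neg h, if_neg h, aLoop_eq_bScan inp (2 * inp.toList.length + i.natAbs + 2) i]
        cases hscan : bScan inp (2 * inp.toList.length + i.natAbs + 2) (i + 1) with
        | none => rfl
        | some j => exact ih _ 0

theorem main_eq (inp : String) (i : Int) :
    validateStringHelpler inp i = validateStringHelpler_alt inp i := by
  rw [validateStringHelpler, validateStringHelpler_alt]
  exact aGo_eq_bGo (inp.toList.length + 1) inp i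

-- ===== VERDICT (by name: the statement is the Claim_ definition above) =====
theorem validateStringHelpler_spec : Claim_equal_validateStringHelpler := by
  intro inp i _
  unfold Spec_validateStringHelpler
  exact main_eq inp i
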